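-- pv_equiv track=rewrite | github.com/archirub/nemo | src/app/shared/tools/styleAudit.py | styleParser
-- ===== SOURCE A (Python) =====
-- def styleParser(scrape):
--
--     selector = [] #Will always return a list even if one selector
--
--     #If multiple selectors, split them up
--     if ',' in scrape:
--
--         while ',' in scrape:
--             next = scrape.find(',')
--             selector.append(scrape[:next])
--             scrape = scrape[next+1:]
--
--         selector.append(scrape) #Append final style in list
--
--     else:
--         selector = [scrape]
--
--     #Process of swapping # for ID, . for class, etc
--     processed = []
--
--     for s in selector:
--         if s[0] == '&':
--             s = s[1:] #Remove subclass tokens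
--
--         if ('.' in s) or ('#' in s):
--             while '.' in s:
--                 next = s.rfind('.') #Start from end and find last occurrence
--                 processed.append((s[next+1:], 'class'))
--                 s = s[:next]
--             while '#' in s:
--                 next = s.rfind('#')
--                 processed.append((s[next+1:], 'ID'))
--                 s = s[:next]
--         else:
--             processed.append((s, 'tag')) #HTML tag selector, not class or ID
--             continue
--
--         if len(s) > 0:
--             processed.append((s, 'tag')) #Catch any other selectors missed at the start of layered classes/IDs
--
--     return processed
-- ===== SOURCE B (Python) =====
-- def styleParser(scrape):
--     processed = []
--     for s in scrape.split(','):
--         if s[0] == '&':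
--             s = s[1:]
--         dot_parts = s.split('.')
--         hash_parts = dot_parts[0].split('#')
--         if len(dot_parts) == 1 and len(hash_parts) == 1:
--             processed.append((s, 'tag'))
--             continue
--         processed.extend((c, 'class') for c in reversed(dot_parts[1:]))
--         processed.extend((i, 'ID') for i in reversed(hash_parts[1:]))
--         if hash_parts[0]:
--             processed.append((hash_parts[0], 'tag'))
--     return processed
-- ===== Notes on version B (the rewrite author's own statement) =====
-- stated objective: simpler
-- what changed: B replaces A's manual comma-scanning while-loop and the repeated rfind-from-the-end while-loops with one str.split per delimiter (',', '.', '#') and emits the reversed tails of the split lists, grouping all class tokens before all ID tokens exactly as A's two loops do.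
import Mathlib
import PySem

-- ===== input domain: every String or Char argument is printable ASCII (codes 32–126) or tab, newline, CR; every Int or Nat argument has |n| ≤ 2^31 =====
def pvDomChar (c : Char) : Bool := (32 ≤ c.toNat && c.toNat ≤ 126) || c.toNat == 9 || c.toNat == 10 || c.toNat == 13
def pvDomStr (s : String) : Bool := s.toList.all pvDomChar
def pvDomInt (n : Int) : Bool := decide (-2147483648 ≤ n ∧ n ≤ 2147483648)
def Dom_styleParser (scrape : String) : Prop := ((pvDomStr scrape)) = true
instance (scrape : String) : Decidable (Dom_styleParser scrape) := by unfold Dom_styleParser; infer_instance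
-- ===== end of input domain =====

-- B replaces A's repeated find/rfind while-loops with one split per delimiter (',', '.', '#'); objective: simpler.

-- ===== PORT A =====
-- Lemmas the ports need for termination (cited in decreasing_by); the equivalence proofs reuse them below.

theorem pvIsIn_singleton (c : Char) (s : List Char) :
    PySem.Chars.isIn [c] s = true ↔ c ∈ s := by
  rw [PySem.Chars.isIn_iff_infix]
  constructor
  · intro h
    exact (List.singleton_sublist).mp h.sublist
  · intro h
    obtain ⟨u, v, rfl⟩ := List.append_of_mem h
    exact ⟨u, v, by simp⟩

theorem pvDecompFirst (c : Char) (s : List Char) (h : c ∈ s) :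
    ∃ u v, s = u ++ c :: v ∧ c ∉ u := by
  induction s with
  | nil => simp at h
  | cons x xs ih =>
    by_cases hx : x = c
    · exact ⟨[], xs, by simp [hx], by simp⟩
    · have hmem : c ∈ xs := by
        rcases List.mem_cons.mp h with h1 | h1
        · exact absurd h1.symm hx
        · exact h1
      obtain ⟨u, v, rfl, hu⟩ := ih hmem
      refine ⟨x :: u, v, rfl, ?_⟩
      intro hm
      rcases List.mem_cons.mp hm with h1 | h1
      · exact hx h1.symm
      · exact hu h1

theorem pvDecompLast (c : Char) (s : List Char) (h : c ∈ s) :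
    ∃ u v, s = u ++ c :: v ∧ c ∉ v := by
  have hr : c ∈ s.reverse := by simpa using h
  obtain ⟨u, v, hsr, hu⟩ := pvDecompFirst c s.reverse hr
  refine ⟨v.reverse, u.reverse, ?_, by simpa using hu⟩
  have : s.reverse.reverse = (u ++ c :: v).reverse := by rw [hsr]
  simpa using this

theorem pvPrefixSingleton (c : Char) (w : List Char) :
    [c].isPrefixOf w = true ↔ ∃ t, w = c :: t := by
  cases w with
  | nil => simp [List.isPrefixOf]
  | cons x t =>
    constructor
    · intro h
      simp [List.isPrefixOf] at h
      exact ⟨t, by rw [h]⟩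
    · rintro ⟨t', he⟩
      rw [List.cons_eq_cons] at he
      obtain ⟨he1, _⟩ := he
      simp [List.isPrefixOf, he1]

theorem pvDropAppend {α : Type} (u l : List α) (n : Nat) :
    (u ++ l).drop (u.length + n) = l.drop n := by
  rw [List.drop_append]
  simp

theorem pvFindGoCons (sub : List Char) (x : Char) (t : List Char) (k : Nat) :
    PySem.Chars.find.go sub (x :: t) k
      = if sub.isPrefixOf (x :: t) then (k : Int) else PySem.Chars.find.go sub t (k + 1) := by
  rw [PySem.Chars.find.go.eq_def]

theorem pvRfindGoZero (s sub : List Char) :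
    PySem.Chars.rfind.go s sub 0 = if sub.isPrefixOf s then 0 else -1 := by
  rw [PySem.Chars.rfind.go.eq_def]

theorem pvRfindGoSucc (s sub : List Char) (j : Nat) :
    PySem.Chars.rfind.go s sub (j + 1)
      = if sub.isPrefixOf (s.drop (j + 1)) then ((j + 1 : Nat) : Int)
        else PySem.Chars.rfind.go s sub j := by
  rw [PySem.Chars.rfind.go.eq_def]

theorem pvFindGo (c : Char) (u v : List Char) (h : c ∉ u) :
    ∀ k : Nat, PySem.Chars.find.go [c] (u ++ c :: v) k = ((k + u.length : Nat) : Int) := by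
  induction u with
  | nil =>
    intro k
    rw [List.nil_append, pvFindGoCons]
    simp [List.isPrefixOf]
  | cons x u' ih =>
    intro k
    have hx : ¬ (x = c) := fun e => h (by simp [e])
    rw [List.cons_append, pvFindGoCons]
    have hpre : [c].isPrefixOf (x :: (u' ++ c :: v)) = false := by
      simp [List.isPrefixOf]
      exact fun e => hx e.symm
    simp only [hpre, Bool.false_eq_true, if_false]
    rw [ih (fun hm => h (by simp [hm])) (k + 1)]
    congr 1
    simp
    omega

theorem pvFindFirst (c : Char) (u v : List Char) (h : c ∉ u) :
    PySem.Chars.find (u ++ c :: v) [c] = (u.length : Int) := by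
  have := pvFindGo c u v h 0
  simpa [PySem.Chars.find] using this

theorem pvRfindGo (c : Char) (s : List Char) (m : Nat)
    (hm : [c].isPrefixOf (s.drop m) = true) :
    ∀ d : Nat, (∀ i, m < i → i ≤ m + d → [c].isPrefixOf (s.drop i) = false) →
      PySem.Chars.rfind.go s [c] (m + d) = (m : Int) := by
  intro d
  induction d with
  | zero =>
    intro _
    simp only [Nat.add_zero]
    cases m with
    | zero =>
      rw [pvRfindGoZero, if_pos (by simpa using hm)]
      simp
    | succ j =>
      rw [pvRfindGoSucc, if_pos (by simpa using hm)]
  | succ d ih =>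
    intro hnone
    have hstep : [c].isPrefixOf (s.drop (m + d + 1)) = false :=
      hnone (m + d + 1) (by omega) (by omega)
    have heq : m + (d + 1) = (m + d) + 1 := by omega
    rw [heq, pvRfindGoSucc]
    simp only [hstep, Bool.false_eq_true, if_false]
    exact ih (fun i h1 h2 => hnone i h1 (by omega))

theorem pvRfindLast (c : Char) (u v : List Char) (hv : c ∉ v) :
    PySem.Chars.rfind (u ++ c :: v) [c] = (u.length : Int) := by
  have hm : [c].isPrefixOf ((u ++ c :: v).drop u.length) = true := by
    rw [List.drop_left]
    simp [List.isPrefixOf]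
  have hnone : ∀ i, u.length < i → i ≤ u.length + (v.length + 1) →
      [c].isPrefixOf ((u ++ c :: v).drop i) = false := by
    intro i h1 h2
    have hi : i = u.length + (i - u.length) := by omega
    rw [hi, pvDropAppend]
    obtain ⟨j, hj⟩ : ∃ j, i - u.length = j + 1 := ⟨i - u.length - 1, by omega⟩
    rw [hj]
    simp only [List.drop_succ_cons]
    by_contra hfalse
    have hp : [c].isPrefixOf (v.drop j) = true := by
      cases hb : [c].isPrefixOf (v.drop j) with
      | true => rfl
      | false => exact absurd hb hfalse
    obtain ⟨t, ht⟩ := (pvPrefixSingleton c _).mp hp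
    have : c ∈ v.drop j := by rw [ht]; simp
    exact hv (List.mem_of_mem_drop this)
  have hlen : (u ++ c :: v).length = u.length + (v.length + 1) := by simp
  have := pvRfindGo c (u ++ c :: v) u.length hm (v.length + 1) hnone
  simpa [PySem.Chars.rfind, hlen] using this

theorem pvFindSliceLt (c : Char) (s : List Char) (h : PySem.Chars.isIn [c] s = true) :
    (PySem.List.slice s (some (PySem.Chars.find s [c] + 1)) none).length < s.length := by
  obtain ⟨u, v, rfl, hu⟩ := pvDecompFirst c s ((pvIsIn_singleton c s).mp h)
  rw [pvFindFirst c u v hu]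
  rw [PySem.List.slice_from _ (by positivity)]
  have h1 : ((u.length : Int) + 1).toNat = u.length + 1 := by omega
  rw [h1, pvDropAppend]
  simp
  omega

theorem pvRfindSliceLt (c : Char) (s : List Char) (h : PySem.Chars.isIn [c] s = true) :
    (PySem.List.slice s none (some (PySem.Chars.rfind s [c]))).length < s.length := by
  obtain ⟨u, v, rfl, hv⟩ := pvDecompLast c s ((pvIsIn_singleton c s).mp h)
  rw [pvRfindLast c u v hv]
  rw [PySem.List.slice_to _ (by positivity)]
  simp

-- A's comma-scanning while loop: while ',' in scrape: next = scrape.find(','); append scrape[:next];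
-- scrape = scrape[next+1:] — followed by the final append of the remainder.
def pvCommaLoopA (scrape : List Char) (selector : List (List Char)) : List (List Char) :=
  if h : PySem.Chars.isIn [','] scrape = true then
    let next := PySem.Chars.find scrape [',']
    pvCommaLoopA (PySem.List.slice scrape (some (next + 1)) none)
      (selector ++ [PySem.List.slice scrape none (some next)])
  else
    selector ++ [scrape]
termination_by scrape.length
decreasing_by exact pvFindSliceLt ',' scrape h

-- A's rfind-from-the-end while loop (used once with '.'/"class" and once with '#'/"ID"):
-- while c in s: next = s.rfind(c); append (s[next+1:], kind); s = s[:next] — returns the tokens and the final s.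
def pvRLoopA (c : Char) (kind : String) (s : List Char) : List (String × String) × List Char :=
  if h : PySem.Chars.isIn [c] s = true then
    let next := PySem.Chars.rfind s [c]
    let rest := pvRLoopA c kind (PySem.List.slice s none (some next))
    ((String.ofList (PySem.List.slice s (some (next + 1)) none), kind) :: rest.1, rest.2)
  else ([], s)
termination_by s.length
decreasing_by exact pvRfindSliceLt c s h

def styleParser (scrape : String) : List (String × String) :=
  let selector := if PySem.Chars.isIn [','] scrape.toList then pvCommaLoopA scrape.toList []
                  else [scrape.toList]
  selector.foldl (fun processed s0 =>
    -- if s[0] == '&': s = s[1:]   (s[0] on an empty selector raises IndexError: excluded by Pre_)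
    let s := if PySem.List.pyGet? s0 0 = some '&' then PySem.List.slice s0 (some 1) none else s0
    if PySem.Chars.isIn ['.'] s || PySem.Chars.isIn ['#'] s then
      let r1 := pvRLoopA '.' "class" s
      let r2 := pvRLoopA '#' "ID" r1.2
      processed ++ r1.1 ++ r2.1 ++ (if 0 < r2.2.length then [(String.ofList r2.2, "tag")] else [])
    else
      processed ++ [(String.ofList s, "tag")]) []

-- ===== PORT B =====
def styleParser_alt (scrape : String) : List (String × String) :=
  (PySem.Chars.splitOn scrape.toList [',']).foldl (fun processed s0 =>
    let s := if PySem.List.pyGet? s0 0 = some '&' then PySem.List.slice s0 (some 1) none else s0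
    let dotParts := PySem.Chars.splitOn s ['.']
    let hashParts := PySem.Chars.splitOn (dotParts.headD []) ['#']
    if dotParts.length = 1 ∧ hashParts.length = 1 then
      processed ++ [(String.ofList s, "tag")]
    else
      processed ++ dotParts.tail.reverse.map (fun p => (String.ofList p, "class"))
        ++ hashParts.tail.reverse.map (fun p => (String.ofList p, "ID"))
        ++ (if hashParts.headD [] ≠ [] then [(String.ofList (hashParts.headD []), "tag")] else [])) []

-- ===== PRECONDITION & SPEC =====
-- Pre_ excludes inputs whose comma-split contains an empty selector: there both Pythons raise IndexError on s[0].
def Pre_styleParser (scrape : String) : Prop :=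
  ∀ p ∈ PySem.Chars.splitOn scrape.toList [','], p ≠ []
instance (scrape : String) : Decidable (Pre_styleParser scrape) := by
  unfold Pre_styleParser; infer_instance

def pvWitness_styleParser : String := "a.b#c,&x#y"

def Spec_styleParser (scrape : String) (out : List (String × String)) : Prop :=
  out = styleParser_alt scrape
instance (scrape : String) (out : List (String × String)) : Decidable (Spec_styleParser scrape out) := by
  unfold Spec_styleParser; infer_instance

-- ===== CLAIM (what is proved, stated in full; the proofs are below) =====
def Claim_equal_styleParser : Prop :=
  ∀ (scrape : String), Dom_styleParser scrape → Pre_styleParser scrape →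
    Spec_styleParser scrape (styleParser scrape)

-- ===== LEMMAS AND PROOFS =====

-- Reference single-character splitter: pvSplitC c s = s.split(c).
def pvSplitC (c : Char) : List Char → List (List Char)
  | [] => [[]]
  | x :: xs =>
    if x = c then [] :: pvSplitC c xs
    else
      match pvSplitC c xs with
      | [] => [[x]]
      | p :: ps => (x :: p) :: ps

theorem pvSplitC_ne_nil (c : Char) (s : List Char) : pvSplitC c s ≠ [] := by
  cases s with
  | nil => simp [pvSplitC]
  | cons x xs =>
    by_cases hx : x = c
    · simp [pvSplitC, hx]
    · cases h : pvSplitC c xs with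
      | nil => simp [pvSplitC, hx, h]
      | cons p ps => simp [pvSplitC, hx, h]

theorem pvSplitC_of_not_mem (c : Char) (s : List Char) (h : c ∉ s) :
    pvSplitC c s = [s] := by
  induction s with
  | nil => rfl
  | cons x xs ih =>
    have hx : ¬ x = c := fun e => h (by simp [e])
    have hxs : c ∉ xs := fun hm => h (by simp [hm])
    simp [pvSplitC, hx, ih hxs]

theorem pvSplitC_append_first (c : Char) (u v : List Char) (h : c ∉ u) :
    pvSplitC c (u ++ c :: v) = u :: pvSplitC c v := by
  induction u with
  | nil => simp [pvSplitC]
  | cons x u' ih =>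
    have hx : ¬ x = c := fun e => h (by simp [e])
    have hu : c ∉ u' := fun hm => h (by simp [hm])
    simp [pvSplitC, hx, ih hu]

theorem pvSplitC_append_last (c : Char) (u v : List Char) (h : c ∉ v) :
    pvSplitC c (u ++ c :: v) = pvSplitC c u ++ [v] := by
  induction u with
  | nil => simp [pvSplitC, pvSplitC_of_not_mem c v h]
  | cons x u' ih =>
    by_cases hx : x = c
    · simp [pvSplitC, hx, ih]
    · cases hsp' : pvSplitC c u' with
      | nil => exact absurd hsp' (pvSplitC_ne_nil c _)
      | cons q qs =>
        have hih : pvSplitC c (u' ++ c :: v) = q :: (qs ++ [v]) := by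
          rw [ih, hsp']; simp
        simp [pvSplitC, hx, hih, hsp']

theorem pvSplitC_length (c : Char) (s : List Char) :
    (pvSplitC c s).length = s.count c + 1 := by
  induction s with
  | nil => simp [pvSplitC]
  | cons x xs ih =>
    by_cases hx : x = c
    · subst hx
      simp [pvSplitC, ih, List.count_cons_self]
    · cases h : pvSplitC c xs with
      | nil => exact absurd h (pvSplitC_ne_nil c _)
      | cons p ps =>
        rw [h] at ih
        have hne : c ≠ x := fun e => hx e.symm
        have hcnt : List.count c (x :: xs) = List.count c xs := by
          simp [List.count_cons]
          exact hx
        simp only [pvSplitC, hx, if_false, h, hcnt]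
        simpa using ih

theorem pvSplitC_length_one (c : Char) (s : List Char) :
    (pvSplitC c s).length = 1 ↔ c ∉ s := by
  rw [pvSplitC_length]
  constructor
  · intro h
    have : s.count c = 0 := by omega
    exact (List.count_eq_zero).mp this
  · intro h
    rw [List.count_eq_zero.mpr h]

-- splitOn with a single-character separator computes pvSplitC.
def pvConsHead (pre : List Char) : List (List Char) → List (List Char)
  | [] => [pre]
  | p :: ps => (pre ++ p) :: ps

theorem pvSplitOnGoNil (sep : List Char) (f : Nat) (cur : List Char) (acc : List (List Char)) :
    PySem.Chars.splitOn.go sep (f + 1) [] cur acc = (cur.reverse :: acc).reverse := by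
  rw [PySem.Chars.splitOn.go.eq_def]

theorem pvSplitOnGoCons (sep : List Char) (f : Nat) (x : Char) (rest cur : List Char)
    (acc : List (List Char)) :
    PySem.Chars.splitOn.go sep (f + 1) (x :: rest) cur acc
      = if sep.isPrefixOf (x :: rest)
        then PySem.Chars.splitOn.go sep f ((x :: rest).drop sep.length) [] (cur.reverse :: acc)
        else PySem.Chars.splitOn.go sep f rest (x :: cur) acc := by
  rw [PySem.Chars.splitOn.go.eq_def]

theorem pvSplitOnGo (c : Char) :
    ∀ (l cur : List Char) (acc : List (List Char)) (fuel : Nat), l.length < fuel →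
      PySem.Chars.splitOn.go [c] fuel l cur acc
        = acc.reverse ++ pvConsHead cur.reverse (pvSplitC c l) := by
  intro l
  induction l with
  | nil =>
    intro cur acc fuel hfuel
    obtain ⟨f, rfl⟩ : ∃ f, fuel = f + 1 := ⟨fuel - 1, by omega⟩
    rw [pvSplitOnGoNil]
    simp [pvSplitC, pvConsHead]
  | cons x rest ih =>
    intro cur acc fuel hfuel
    obtain ⟨f, rfl⟩ : ∃ f, fuel = f + 1 := ⟨fuel - 1, by omega⟩
    rw [pvSplitOnGoCons]
    by_cases hx : x = c
    · have hpre : [c].isPrefixOf (x :: rest) = true := by simp [List.isPrefixOf, hx]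
      simp only [hpre, if_true]
      have hdrop : List.drop ([c] : List Char).length (x :: rest) = rest := by simp
      rw [hdrop, ih [] (cur.reverse :: acc) f (by simp at hfuel; omega)]
      cases h : pvSplitC c rest with
      | nil => exact absurd h (pvSplitC_ne_nil c _)
      | cons p ps => simp [pvSplitC, hx, h, pvConsHead]
    · have hpre : [c].isPrefixOf (x :: rest) = false := by
        simp [List.isPrefixOf]
        exact fun e => hx e.symm
      simp only [hpre, Bool.false_eq_true, if_false]
      rw [ih (x :: cur) acc f (by simp at hfuel; omega)]
      cases h : pvSplitC c rest with
      | nil => exact absurd h (pvSplitC_ne_nil c _)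
      | cons p ps => simp [pvSplitC, hx, h, pvConsHead]

theorem pvSplitOn_eq (c : Char) (s : List Char) :
    PySem.Chars.splitOn s [c] = pvSplitC c s := by
  rw [PySem.Chars.splitOn, pvSplitOnGo c s [] [] (s.length + 1) (by omega)]
  cases h : pvSplitC c s with
  | nil => exact absurd h (pvSplitC_ne_nil c _)
  | cons p ps => simp [pvConsHead]

theorem pvTailAppend {α : Type} (l : List α) (x : α) (h : l ≠ []) :
    (l ++ [x]).tail = l.tail ++ [x] := by
  cases l with
  | nil => exact absurd rfl h
  | cons a as => simp

theorem pvHeadDAppend {α : Type} (l : List α) (x : α) (d : α) (h : l ≠ []) :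
    (l ++ [x]).headD d = l.headD d := by
  cases l with
  | nil => exact absurd rfl h
  | cons a as => simp

-- Characterisation of A's rfind loop in terms of the split.
theorem pvRLoopA_eq (c : Char) (kind : String) :
    ∀ (n : Nat) (s : List Char), s.count c = n →
      pvRLoopA c kind s
        = ((pvSplitC c s).tail.reverse.map (fun p => (String.ofList p, kind)),
           (pvSplitC c s).headD []) := by
  intro n
  induction n with
  | zero =>
    intro s hcount
    have hnmem : c ∉ s := List.count_eq_zero.mp hcount
    have hisin : ¬ PySem.Chars.isIn [c] s = true := fun h =>
      hnmem ((pvIsIn_singleton c s).mp h)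
    rw [pvRLoopA]
    simp [hisin, pvSplitC_of_not_mem c s hnmem]
  | succ n ih =>
    intro s hcount
    have hmem : c ∈ s := by
      by_contra hn
      rw [List.count_eq_zero.mpr hn] at hcount
      omega
    obtain ⟨u, v, rfl, hv⟩ := pvDecompLast c s hmem
    have hisin : PySem.Chars.isIn [c] (u ++ c :: v) = true :=
      (pvIsIn_singleton c _).mpr hmem
    rw [pvRLoopA]
    simp only [hisin, dite_true]
    rw [pvRfindLast c u v hv]
    have hslice1 : PySem.List.slice (u ++ c :: v) (some ((u.length : Int) + 1)) none = v := by
      rw [PySem.List.slice_from _ (by positivity)]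
      have h1 : ((u.length : Int) + 1).toNat = u.length + 1 := by omega
      rw [h1, pvDropAppend]
      simp
    have hslice2 : PySem.List.slice (u ++ c :: v) none (some (u.length : Int)) = u := by
      rw [PySem.List.slice_to _ (by positivity)]
      simp
    rw [hslice1, hslice2]
    have hcu : u.count c = n := by
      have hsum : (u ++ c :: v).count c = u.count c + ((c :: v).count c) := List.count_append
      rw [List.count_cons_self, List.count_eq_zero.mpr hv] at hsum
      omega
    rw [ih u hcu]
    rw [pvSplitC_append_last c u v hv]
    have hne := pvSplitC_ne_nil c u
    rw [pvTailAppend _ _ hne, pvHeadDAppend _ _ _ hne]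
    simp

-- Characterisation of A's comma loop.
theorem pvCommaLoopA_eq :
    ∀ (n : Nat) (s : List Char) (acc : List (List Char)), s.count ',' = n →
      pvCommaLoopA s acc = acc ++ pvSplitC ',' s := by
  intro n
  induction n with
  | zero =>
    intro s acc hcount
    have hnmem : ',' ∉ s := List.count_eq_zero.mp hcount
    have hisin : ¬ PySem.Chars.isIn [','] s = true := fun h =>
      hnmem ((pvIsIn_singleton ',' s).mp h)
    rw [pvCommaLoopA]
    simp [hisin, pvSplitC_of_not_mem ',' s hnmem]
  | succ n ih =>
    intro s acc hcount
    have hmem : ',' ∈ s := by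
      by_contra hn
      rw [List.count_eq_zero.mpr hn] at hcount
      omega
    obtain ⟨u, v, rfl, hu⟩ := pvDecompFirst ',' s hmem
    have hisin : PySem.Chars.isIn [','] (u ++ ',' :: v) = true :=
      (pvIsIn_singleton ',' _).mpr hmem
    rw [pvCommaLoopA]
    simp only [hisin, dite_true]
    rw [pvFindFirst ',' u v hu]
    have hslice1 : PySem.List.slice (u ++ ',' :: v) (some ((u.length : Int) + 1)) none = v := by
      rw [PySem.List.slice_from _ (by positivity)]
      have h1 : ((u.length : Int) + 1).toNat = u.length + 1 := by omega
      rw [h1, pvDropAppend]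
      simp
    have hslice2 : PySem.List.slice (u ++ ',' :: v) none (some (u.length : Int)) = u := by
      rw [PySem.List.slice_to _ (by positivity)]
      simp
    rw [hslice1, hslice2]
    have hcv : v.count ',' = n := by
      have hsum : (u ++ ',' :: v).count ',' = u.count ',' + ((',' :: v).count ',') := List.count_append
      rw [List.count_cons_self, List.count_eq_zero.mpr hu] at hsum
      omega
    rw [ih v (acc ++ [u]) hcv]
    rw [pvSplitC_append_first ',' u v hu]
    simp

-- The per-selector bodies of the two folds agree on every piece.
theorem pvStep_eq (processed : List (String × String)) (s0 : List Char) :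
    (let s := if PySem.List.pyGet? s0 0 = some '&' then PySem.List.slice s0 (some 1) none else s0
     if PySem.Chars.isIn ['.'] s || PySem.Chars.isIn ['#'] s then
       let r1 := pvRLoopA '.' "class" s
       let r2 := pvRLoopA '#' "ID" r1.2
       processed ++ r1.1 ++ r2.1 ++ (if 0 < r2.2.length then [(String.ofList r2.2, "tag")] else [])
     else
       processed ++ [(String.ofList s, "tag")])
    =
    (let s := if PySem.List.pyGet? s0 0 = some '&' then PySem.List.slice s0 (some 1) none else s0
     let dotParts := PySem.Chars.splitOn s ['.']
     let hashParts := PySem.Chars.splitOn (dotParts.headD []) ['#']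
     if dotParts.length = 1 ∧ hashParts.length = 1 then
       processed ++ [(String.ofList s, "tag")]
     else
       processed ++ dotParts.tail.reverse.map (fun p => (String.ofList p, "class"))
         ++ hashParts.tail.reverse.map (fun p => (String.ofList p, "ID"))
         ++ (if hashParts.headD [] ≠ [] then [(String.ofList (hashParts.headD []), "tag")] else [])) := by
  set s := if PySem.List.pyGet? s0 0 = some '&' then PySem.List.slice s0 (some 1) none else s0 with hs
  simp only [pvSplitOn_eq]
  by_cases hnd : '.' ∉ s ∧ '#' ∉ s
  · obtain ⟨hdot, hhash⟩ := hnd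
    have h1 : pvSplitC '.' s = [s] := pvSplitC_of_not_mem _ _ hdot
    have hi1 : PySem.Chars.isIn ['.'] s = false := by
      cases hb : PySem.Chars.isIn ['.'] s with
      | false => rfl
      | true => exact absurd ((pvIsIn_singleton _ _).mp hb) hdot
    have hi2 : PySem.Chars.isIn ['#'] s = false := by
      cases hb : PySem.Chars.isIn ['#'] s with
      | false => rfl
      | true => exact absurd ((pvIsIn_singleton _ _).mp hb) hhash
    simp [hi1, hi2, h1, pvSplitC_of_not_mem '#' s hhash]
  · have hor : '.' ∈ s ∨ '#' ∈ s := by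
      by_contra hno
      exact hnd ⟨fun h => hno (Or.inl h), fun h => hno (Or.inr h)⟩
    have hcond : (PySem.Chars.isIn ['.'] s || PySem.Chars.isIn ['#'] s) = true := by
      rcases hor with h | h
      · rw [(pvIsIn_singleton '.' s).mpr h]; simp
      · rw [(pvIsIn_singleton '#' s).mpr h]; simp
    have hncond : ¬ ((pvSplitC '.' s).length = 1
        ∧ (pvSplitC '#' ((pvSplitC '.' s).headD [])).length = 1) := by
      intro hb
      obtain ⟨hl1, hl2⟩ := hb
      have hd : '.' ∉ s := (pvSplitC_length_one '.' s).mp hl1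
      rw [pvSplitC_of_not_mem '.' s hd] at hl2
      simp only [List.headD_cons] at hl2
      have hh : '#' ∉ s := (pvSplitC_length_one '#' s).mp hl2
      rcases hor with h | h
      · exact hd h
      · exact hh h
    rw [pvRLoopA_eq '.' "class" (s.count '.') s rfl]
    rw [pvRLoopA_eq '#' "ID" (((pvSplitC '.' s).headD []).count '#') ((pvSplitC '.' s).headD []) rfl]
    simp only [hcond, if_true, hncond, if_false]
    congr 1
    split_ifs with ha hb hb
    · rfl
    · exact absurd (List.length_pos_iff.mp ha) hb
    · exact absurd (List.length_pos_iff.mpr hb) ha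
    · rfl

-- ===== VERDICT (by name: the statement is the Claim_ definition above) =====
theorem styleParser_spec : Claim_equal_styleParser := by
  intro scrape _ _
  show styleParser scrape = styleParser_alt scrape
  unfold styleParser styleParser_alt
  have hsel : (if PySem.Chars.isIn [','] scrape.toList then pvCommaLoopA scrape.toList []
               else [scrape.toList]) = PySem.Chars.splitOn scrape.toList [','] := by
    rw [pvSplitOn_eq]
    split_ifs with h
    · simpa using pvCommaLoopA_eq (scrape.toList.count ',') scrape.toList [] rfl
    · have hnmem : ',' ∉ scrape.toList := fun hm => h ((pvIsIn_singleton ',' _).mpr hm)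
      rw [pvSplitC_of_not_mem ',' _ hnmem]
  rw [hsel]
  induction PySem.Chars.splitOn scrape.toList [','] using List.reverseRecOn with
  | nil => rfl
  | append_singleton xs x ih =>
    rw [List.foldl_append, List.foldl_append, ih]
    simp only [List.foldl_cons, List.foldl_nil]
    exact pvStep_eq _ x
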